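-- pv_equiv track=rewrite | github.com/ZePedroFernandes/ASI | Parte 1/Resoluções/Semana4/Ex2/stats.py | URLmaisVisitado
-- ===== SOURCE A (Python) =====
-- def URLmaisVisitado(URL: dict):
--     mostVisitedURL = ""
--     timesVisited = 0
--     for url, dateURL in URL.items():
--         tmp = 0
--         for date, visits in dateURL.items():
--             tmp += len(visits)
--         if tmp > timesVisited:
--             mostVisitedURL = url
--             timesVisited = tmp
--
--     return mostVisitedURL
-- ===== SOURCE B (Python) =====
-- def URLmaisVisitado(URL: dict):
--     # sort-then-select: rank URLs by total visits descending (stable sort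
--     # keeps the first-inserted URL ahead on ties), then take the top entry.
--     totals = [(url, sum(len(v) for v in dates.values())) for url, dates in URL.items()]
--     ranked = sorted(totals, key=lambda p: -p[1])
--     if ranked and ranked[0][1] > 0:
--         return ranked[0][0]
--     return ""
-- ===== Notes on version B (the rewrite author's own statement) =====
-- stated objective: alternative
-- what changed: Replaces A's single-pass running-max loop with a sort-then-select algorithm: build the per-URL totals table, stably sort it by descending total, and read the winner off the head (stability gives A's first-max tie rule); it trades A's O(n) selection for an O(n log n) sort.
import Mathlib
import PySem

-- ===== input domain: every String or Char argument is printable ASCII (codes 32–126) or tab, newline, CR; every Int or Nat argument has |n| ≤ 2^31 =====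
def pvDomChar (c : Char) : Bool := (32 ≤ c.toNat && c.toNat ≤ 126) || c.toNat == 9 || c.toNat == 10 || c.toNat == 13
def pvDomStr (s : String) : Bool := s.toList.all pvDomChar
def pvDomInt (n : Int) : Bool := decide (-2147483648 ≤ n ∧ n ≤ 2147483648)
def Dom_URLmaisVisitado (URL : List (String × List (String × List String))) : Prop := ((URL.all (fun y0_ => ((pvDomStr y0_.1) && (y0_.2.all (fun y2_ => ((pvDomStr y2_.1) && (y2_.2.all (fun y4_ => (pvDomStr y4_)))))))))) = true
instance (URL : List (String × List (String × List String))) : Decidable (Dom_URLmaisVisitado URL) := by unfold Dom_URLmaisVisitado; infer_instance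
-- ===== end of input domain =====

-- B replaces A's running-max loop with sort-then-select: build the totals table, stably sort it by descending total, read the winner off the head (alternative algorithm, similar cost).


-- ===== PORT A =====
-- for url, dateURL in URL.items(): tmp = Σ len(visits); if tmp > timesVisited: update the pair
def URLmaisVisitado (URL : List (String × List (String × List String))) : String :=
  (URL.foldl
    (fun (acc : String × Nat) p =>
      let tmp := p.2.foldl (fun t q => t + q.2.length) 0
      if tmp > acc.2 then (p.1, tmp) else acc)
    ("", 0)).1

-- ===== PORT B =====
-- totals = [(url, sum(len(v) for v in dates.values())) …]; ranked = sorted(totals, key=lambda p: -p[1]);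
-- return ranked[0][0] if ranked and ranked[0][1] > 0 else ""
def URLmaisVisitado_alt (URL : List (String × List (String × List String))) : String :=
  let totals : List (String × Nat) :=
    URL.map (fun p => (p.1, (p.2.map (fun q => q.2.length)).foldl (· + ·) 0))
  match PySem.List.sorted totals (fun p => -(p.2 : Int)) false with
  | [] => ""
  | b :: _ => if b.2 > 0 then b.1 else ""

-- ===== PRECONDITION & SPEC =====
def Spec_URLmaisVisitado (URL : List (String × List (String × List String))) (out : String) : Prop := out = URLmaisVisitado_alt URL
instance (URL : List (String × List (String × List String))) (out : String) : Decidable (Spec_URLmaisVisitado URL out) := by unfold Spec_URLmaisVisitado; infer_instance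

-- ===== CLAIM (what is proved, stated in full; the proofs are below) =====
def Claim_equal_URLmaisVisitado : Prop := ∀ (URL : List (String × List (String × List String))), Dom_URLmaisVisitado URL → Spec_URLmaisVisitado URL (URLmaisVisitado URL)

-- ===== LEMMAS AND PROOFS =====

-- A's max-tracking step over the totals list
def pvStepA (acc : String × Nat) (x : String × Nat) : String × Nat :=
  if x.2 > acc.2 then x else acc

-- the "first maximal element" accumulator the sorted head turns out to compute
def pvStepB (o : Option (String × Nat)) (x : String × Nat) : Option (String × Nat) :=
  match o with
  | none => some x
  | some m => if m.2 < x.2 then some x else some m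

-- head of insertBy (descending by count) is exactly one pvStepB step
lemma head_insertBy (x : String × Nat) (acc : List (String × Nat)) :
    (PySem.List.insertBy (fun a b => decide ((-(a.2 : Int)) < (-(b.2 : Int)))) x acc).head? =
      pvStepB acc.head? x := by
  cases acc with
  | nil => rfl
  | cons y ys =>
    simp only [PySem.List.insertBy, pvStepB, List.head?_cons]
    have h : ((-(x.2 : Int)) < (-(y.2 : Int))) ↔ y.2 < x.2 := by
      constructor <;> intro h <;> omega
    by_cases hc : y.2 < x.2
    · rw [if_pos (by simpa [h] using hc), if_pos hc, List.head?_cons]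
    · rw [if_neg (by simpa [h] using hc), if_neg hc, List.head?_cons]

-- head of the insertion-sort fold is the pvStepB fold
lemma head_sortFold (ts : List (String × Nat)) (acc : List (String × Nat)) :
    ((ts.foldl (fun acc x =>
        PySem.List.insertBy (fun a b => decide ((-(a.2 : Int)) < (-(b.2 : Int)))) x acc) acc).head?) =
      ts.foldl pvStepB acc.head? := by
  induction ts generalizing acc with
  | nil => rfl
  | cons x t ih =>
    simp only [List.foldl_cons]
    rw [ih, head_insertBy]

-- head of B's sorted ranking = the pvStepB fold
lemma head_sorted (ts : List (String × Nat)) :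
    (PySem.List.sorted ts (fun p => -(p.2 : Int)) false).head? = ts.foldl pvStepB none := by
  simpa [PySem.List.sorted] using head_sortFold ts []

-- invariant linking A's accumulator with the first-maximal accumulator
def pvInv (a : String × Nat) (o : Option (String × Nat)) : Prop :=
  (o = none ∧ a = ("", 0)) ∨
  ∃ m, o = some m ∧ ((0 < m.2 ∧ a = m) ∨ (m.2 = 0 ∧ a = ("", 0)))

lemma pvInv_step (a : String × Nat) (o : Option (String × Nat)) (x : String × Nat)
    (h : pvInv a o) : pvInv (pvStepA a x) (pvStepB o x) := by
  rcases h with ⟨ho, ha⟩ | ⟨m, ho, ⟨hm, ha⟩ | ⟨hm, ha⟩⟩ <;> subst ho <;> subst ha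
  · simp only [pvStepA, pvStepB, pvInv]
    split_ifs with h1
    · exact Or.inr ⟨x, rfl, Or.inl ⟨h1, rfl⟩⟩
    · exact Or.inr ⟨x, rfl, Or.inr ⟨Nat.eq_zero_of_le_zero (Nat.not_lt.mp h1), rfl⟩⟩
  · simp only [pvStepA, pvStepB, pvInv, gt_iff_lt]
    split_ifs with h1
    · exact Or.inr ⟨x, rfl, Or.inl ⟨Nat.lt_of_le_of_lt (Nat.zero_le _) h1, rfl⟩⟩
    · exact Or.inr ⟨a, rfl, Or.inl ⟨hm, rfl⟩⟩
  · simp only [pvStepA, pvStepB, pvInv, hm, gt_iff_lt]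
    split_ifs with h1
    · exact Or.inr ⟨x, rfl, Or.inl ⟨h1, rfl⟩⟩
    · exact Or.inr ⟨m, rfl, Or.inr ⟨hm, rfl⟩⟩

lemma pvInv_foldl (ts : List (String × Nat)) (a : String × Nat) (o : Option (String × Nat))
    (h : pvInv a o) : pvInv (ts.foldl pvStepA a) (ts.foldl pvStepB o) := by
  induction ts generalizing a o with
  | nil => exact h
  | cons x t ih => exact ih _ _ (pvInv_step a o x h)

-- the central equality, stated on the totals list
lemma fold_vs_sort (ts : List (String × Nat)) :
    (ts.foldl pvStepA ("", 0)).1 =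
      (match PySem.List.sorted ts (fun p => -(p.2 : Int)) false with
       | [] => ""
       | b :: _ => if b.2 > 0 then b.1 else "") := by
  have hs := head_sorted ts
  have h := pvInv_foldl ts ("", 0) none (Or.inl ⟨rfl, rfl⟩)
  rcases h with ⟨ho, ha⟩ | ⟨m, ho, hrest⟩
  · rw [ho] at hs
    rw [List.head?_eq_none_iff.mp hs, ha]
  · rw [ho] at hs
    rcases hsv : PySem.List.sorted ts (fun p => -(p.2 : Int)) false with _ | ⟨b, t⟩
    · rw [hsv] at hs; exact absurd hs (by simp)
    · rw [hsv, List.head?_cons] at hs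
      have hbm : b = m := by injection hs
      subst hbm
      rcases hrest with ⟨hm, ha⟩ | ⟨hm, ha⟩
      · rw [ha]; exact (if_pos hm).symm
      · rw [ha]; simp [hm]

-- ===== VERDICT (by name: the statement is the Claim_ definition above) =====
theorem URLmaisVisitado_spec : Claim_equal_URLmaisVisitado := by
  intro URL _
  show URLmaisVisitado URL = URLmaisVisitado_alt URL
  unfold URLmaisVisitado URLmaisVisitado_alt
  have hmap : URL.map (fun p => (p.1, (p.2.map (fun q => q.2.length)).foldl (· + ·) 0))
      = URL.map (fun p => (p.1, p.2.foldl (fun t q => t + q.2.length) 0)) := by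
    apply List.map_congr_left
    intro p _
    simp [List.foldl_map]
  have hA : (URL.foldl
        (fun (acc : String × Nat) p =>
          let tmp := p.2.foldl (fun t q => t + q.2.length) 0
          if tmp > acc.2 then (p.1, tmp) else acc) ("", 0)) =
      ((URL.map (fun p => (p.1, p.2.foldl (fun t q => t + q.2.length) 0))).foldl pvStepA ("", 0)) := by
    rw [List.foldl_map]
    simp only [pvStepA]
  simp only [hmap, hA]
  exact fold_vs_sort _
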